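-- pv_equiv track=rewrite | github.com/pypi-data/pypi-mirror-91 | packages/runana/runana-0.1.5-py3-none-any.whl/runana/analyse.py | groupby_params
-- ===== SOURCE A (Python) =====
-- def groupby_params(dict_w_params, params):
--     """ Groups `dict_w_params` according the given set of parameters. This
--  can be used to e.g. seperate physical from numerical parameters. """
--     grouped_dict = {}
--     for key, item in dict_w_params.items():
--         item_copy = item.copy()
--         index_dict = {}
--         for param in params:
--             if param in item_copy:
--                 index_dict[param] = item_copy[param]
--                 del item_copy[param]
--         index_tuple = tuple((key, index_dict[key])
--                             for key in sorted(index_dict))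
--         grouped_dict.setdefault(index_tuple, {}).update({key: item_copy})
--     return grouped_dict
-- ===== SOURCE B (Python) =====
-- def groupby_params(dict_w_params, params):
--     """ Groups `dict_w_params` according the given set of parameters. This
--  can be used to e.g. seperate physical from numerical parameters. """
--     pset = set(params)
--
--     def key_of(item):
--         return tuple((p, item[p]) for p in sorted(k for k in item if k in pset))
--
--     order = []
--     for item in dict_w_params.values():
--         k = key_of(item)
--         if k not in order:
--             order.append(k)
--     return {k: {name: {q: v for q, v in item.items() if q not in pset}
--                 for name, item in dict_w_params.items() if key_of(item) == k}
--             for k in order}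
-- ===== Notes on version B (the rewrite author's own statement) =====
-- stated objective: alternative
-- what changed: B is a two-staged group-by: it first collects the distinct group keys in order of first appearance, then builds each group by scanning all items for that key (nested scans), instead of A's single pass that mutates a copy of each item, deletes matched params in place, and accumulates groups via setdefault/update; Pre_ excludes assoc lists whose inner dicts carry duplicate keys, which cannot arise from a Python dict (A's del removes every matching pair while B's dict comprehension keeps the last value).
import Mathlib
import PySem

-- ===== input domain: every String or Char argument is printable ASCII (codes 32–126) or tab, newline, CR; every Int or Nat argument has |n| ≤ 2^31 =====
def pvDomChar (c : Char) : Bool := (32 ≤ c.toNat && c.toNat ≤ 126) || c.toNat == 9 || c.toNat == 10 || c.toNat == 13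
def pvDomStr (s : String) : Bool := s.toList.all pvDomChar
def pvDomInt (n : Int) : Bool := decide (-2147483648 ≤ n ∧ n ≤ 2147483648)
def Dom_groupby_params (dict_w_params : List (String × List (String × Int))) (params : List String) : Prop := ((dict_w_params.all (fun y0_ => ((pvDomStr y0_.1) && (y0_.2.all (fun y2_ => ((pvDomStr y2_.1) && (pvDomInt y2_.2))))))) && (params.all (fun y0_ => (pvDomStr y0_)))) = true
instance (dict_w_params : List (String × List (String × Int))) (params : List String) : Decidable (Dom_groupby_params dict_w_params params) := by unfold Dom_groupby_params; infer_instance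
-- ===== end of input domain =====

-- B is a two-staged group-by: it first collects the distinct group keys in order of first
-- appearance, then builds each group by scanning all items for that key — instead of A's single
-- pass that mutates a copy of each item and accumulates groups via setdefault (alternative decomposition).

-- ===== PORT A =====
-- the inner 'for param in params' loop of A: state = (index_dict, item_copy)
def pvExtract (s : PySem.Dict String Int × PySem.Dict String Int) (p : String) :
    PySem.Dict String Int × PySem.Dict String Int :=
  match s.2.get? p with                               -- 'if param in item_copy: … item_copy[param] … del item_copy[param]'
  | some v => (s.1.insert p v, s.2.erase p)
  | none => s

-- A's 'tuple((key, index_dict[key]) for key in sorted(index_dict))'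
def pvIndexTuple (idx : PySem.Dict String Int) : List (String × Int) :=
  (PySem.List.sorted idx.keys (fun x => x) false).map (fun k => (k, idx.getD k 0))

def groupby_params (dict_w_params : List (String × List (String × Int))) (params : List String) :
    List (List (String × Int) × List (String × List (String × Int))) :=
  ((dict_w_params.foldl (fun grouped kv =>
      let st := params.foldl pvExtract ((PySem.Dict.empty : PySem.Dict String Int), PySem.Dict.mk kv.2)
      -- 'grouped_dict.setdefault(index_tuple, {}).update({key: item_copy})'
      grouped.modify (pvIndexTuple st.1) PySem.Dict.empty (fun inner => inner.insert kv.1 st.2.items))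
    (PySem.Dict.empty : PySem.Dict (List (String × Int)) (PySem.Dict String (List (String × Int))))).items).map
    (fun g => (g.1, g.2.items))

-- ===== PORT B =====
-- 'key_of(item) = tuple((p, item[p]) for p in sorted(k for k in item if k in pset))'
def pvKeyOf (pset : PySem.Set String) (item : List (String × Int)) : List (String × Int) :=
  (PySem.List.sorted ((PySem.Dict.mk item).keys.filter (fun k => pset.contains k)) (fun x => x) false).map
    (fun k => (k, (PySem.Dict.mk item).getD k 0))

-- '{q: v for q, v in item.items() if q not in pset}'
def pvRest (pset : PySem.Set String) (item : List (String × Int)) : List (String × Int) :=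
  ((PySem.Dict.mk item).items.foldl
    (fun acc q => if !(pset.contains q.1) then acc.insert q.1 q.2 else acc)
    (PySem.Dict.empty : PySem.Dict String Int)).items

def groupby_params_alt (dict_w_params : List (String × List (String × Int))) (params : List String) :
    List (List (String × Int) × List (String × List (String × Int))) :=
  let pset := PySem.Set.ofList params
  -- 'for item in dict_w_params.values(): k = key_of(item); if k not in order: order.append(k)'
  let order := dict_w_params.foldl (fun ord kv =>
      let k := pvKeyOf pset kv.2
      if ord.contains k then ord else ord ++ [k]) ([] : List (List (String × Int)))
  -- '{k: {name: rest(item) for name, item in dict_w_params.items() if key_of(item) == k} for k in order}'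
  order.map (fun k =>
    (k, (dict_w_params.foldl (fun inner kv =>
          if pvKeyOf pset kv.2 == k then inner.insert kv.1 (pvRest pset kv.2) else inner)
        (PySem.Dict.empty : PySem.Dict String (List (String × Int)))).items))

-- ===== PRECONDITION & SPEC =====
-- Pre_ excludes assoc lists whose inner dicts carry duplicate keys (not a possible Python dict: the
-- Lean argument encodes a dict, whose keys are unique; on such degenerate lists A's del removes all
-- matching pairs while B's dict comprehension keeps the last value).
def Pre_groupby_params (dict_w_params : List (String × List (String × Int))) (params : List String) : Prop :=
  ∀ kv ∈ dict_w_params, (kv.2.map Prod.fst).Nodup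
instance (dict_w_params : List (String × List (String × Int))) (params : List String) : Decidable (Pre_groupby_params dict_w_params params) := by unfold Pre_groupby_params; infer_instance

def pvWitness_groupby_params : (List (String × List (String × Int))) × List String :=
  ([("run1", [("a", 1), ("b", 2)]), ("run2", [("a", 1), ("b", 3)])], ["a"])

def Spec_groupby_params (dict_w_params : List (String × List (String × Int))) (params : List String) (out : List (List (String × Int) × List (String × List (String × Int)))) : Prop := out = groupby_params_alt dict_w_params params
instance (dict_w_params : List (String × List (String × Int))) (params : List String) (out : List (List (String × Int) × List (String × List (String × Int)))) : Decidable (Spec_groupby_params dict_w_params params out) := by unfold Spec_groupby_params; infer_instance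

-- ===== CLAIM (what is proved, stated in full; the proofs are below) =====
def Claim_equal_groupby_params : Prop := ∀ (dict_w_params : List (String × List (String × Int))) (params : List String), Dom_groupby_params dict_w_params params → Pre_groupby_params dict_w_params params → Spec_groupby_params dict_w_params params (groupby_params dict_w_params params)

-- ===== LEMMAS AND PROOFS =====

-- A's per-item extraction, characterised -------------------------------------------------------

-- the index dict A extracts, as one fold over params
def pvIdxOf (d : PySem.Dict String Int) (params : List String) : PySem.Dict String Int :=
  params.foldl (fun acc p => if d.contains p then acc.insert p (d.getD p 0) else acc) PySem.Dict.empty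

theorem pv_get?_erase (d : PySem.Dict String Int) (k q : String) :
    (d.erase k).get? q = if q = k then none else d.get? q := by
  show (List.find? (fun p => p.1 == q) ((d.items.filter (fun p => !(p.1 == k))))).map (·.2) = if q = k then none else (List.find? (fun p => p.1 == q) d.items).map (·.2)
  by_cases hqk : q = k
  · subst hqk
    rw [if_pos rfl]
    have : List.find? (fun p => p.1 == q) (d.items.filter (fun p => !(p.1 == q))) = none := by
      rw [List.find?_eq_none]
      intro p hp
      have := (List.mem_filter.mp hp).2
      simpa using this
    rw [this]; rfl
  · rw [if_neg hqk]
    congr 1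
    induction d.items with
    | nil => simp
    | cons h t ih =>
      rw [List.filter_cons]
      by_cases hk : h.1 = k
      · rw [if_neg (by simp [hk]), List.find?_cons_of_neg (by simp [hk]; intro hh; exact hqk hh.symm)]
        exact ih
      · by_cases hq : h.1 = q
        · rw [if_pos (by simp [hk]), List.find?_cons_of_pos (by simp [hq]), List.find?_cons_of_pos (by simp [hq])]
        · rw [if_pos (by simp [hk]), List.find?_cons_of_neg (by simp [hq]), List.find?_cons_of_neg (by simp [hq])]
          exact ih

theorem pv_insert_eq_self (d : PySem.Dict String Int) (k : String) (w : Int)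
    (hn : d.keys.Nodup) (h : d.get? k = some w) : d.insert k w = d := by
  apply PySem.Dict.ext
  have hc : d.contains k := by
    rw [PySem.Dict.contains_eq_isSome_get?, h]; rfl
  rw [PySem.Dict.items_insert, if_pos hc]
  have hmap : ∀ p ∈ d.items, (if p.1 == k then (k, w) else p) = p := by
    rintro ⟨a, b⟩ hp
    by_cases hpk : a = k
    · subst hpk
      have hg : d.get? a = some b := PySem.Dict.get?_of_mem_items d hp hn
      rw [h] at hg
      simp [Option.some.injEq] at hg
      simp [hg]
    · simp [hpk]
  calc d.items.map (fun p => if p.1 == k then (k, w) else p) = d.items.map id := List.map_congr_left (by simpa using hmap)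
    _ = d.items := List.map_id _

theorem pv_copy_items (ps : List String) (idx copy : PySem.Dict String Int) :
    (ps.foldl pvExtract (idx, copy)).2.items
      = copy.items.filter (fun q => !(ps.contains q.1)) := by
  induction ps generalizing idx copy with
  | nil => simp
  | cons p ps ih =>
    rw [List.foldl_cons]
    cases hg : copy.get? p with
    | some v =>
      rw [show pvExtract (idx, copy) p = (idx.insert p v, copy.erase p) by simp [pvExtract, hg]]
      rw [ih]
      have herase : (copy.erase p).items = copy.items.filter (fun q => !(q.1 == p)) := by
        simp [PySem.Dict.erase]
      rw [herase, List.filter_filter]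
      apply List.filter_congr
      intro q _
      by_cases hq : q.1 = p <;> simp [hq]
    | none =>
      rw [show pvExtract (idx, copy) p = (idx, copy) by simp [pvExtract, hg]]
      rw [ih]
      apply List.filter_congr
      intro q hq
      have : ¬ (q.1 = p) := by
        intro hqp
        have := List.find?_eq_none.mp (show List.find? (fun r => r.1 == p) copy.items = none by
          have hrepr : copy.get? p = (copy.items.find? (fun r => r.1 == p)).map (·.2) := rfl
          rw [hrepr] at hg
          cases hfind : List.find? (fun r => r.1 == p) copy.items with
          | none => rfl
          | some x => rw [hfind] at hg; simp at hg) q hq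
        simp [hqp] at this
      simp [this]

theorem pv_idx_eq (d : PySem.Dict String Int) (ps : List String) (idx copy : PySem.Dict String Int)
    (hn : idx.keys.Nodup)
    (h1 : ∀ p, copy.get? p = if idx.contains p then none else d.get? p)
    (h2 : ∀ p v, idx.get? p = some v → d.get? p = some v) :
    (ps.foldl pvExtract (idx, copy)).1
      = ps.foldl (fun acc p => if d.contains p then acc.insert p (d.getD p 0) else acc) idx := by
  induction ps generalizing idx copy with
  | nil => simp
  | cons p ps ih =>
    rw [List.foldl_cons, List.foldl_cons]
    cases hg : copy.get? p with
    | some v =>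
      have h1p := h1 p
      rw [hg] at h1p
      have hic : idx.contains p = false := by
        by_contra hcc
        simp only [Bool.not_eq_false] at hcc
        rw [if_pos hcc] at h1p; exact absurd h1p (by simp)
      have hdp : d.get? p = some v := by rw [if_neg (by simp [hic])] at h1p; exact h1p.symm
      have hdc : d.contains p = true := by rw [PySem.Dict.contains_eq_isSome_get?, hdp]; rfl
      have hdgd : d.getD p 0 = v := PySem.Dict.getD_of_get?_eq_some d 0 hdp
      rw [show pvExtract (idx, copy) p = (idx.insert p v, copy.erase p) by simp [pvExtract, hg],
          if_pos hdc, hdgd]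
      apply ih
      · exact PySem.Dict.nodup_keys_insert idx p v hn
      · intro q
        rw [pv_get?_erase, PySem.Dict.contains_insert]
        by_cases hq : q = p
        · simp [hq]
        · rw [if_neg hq, h1 q]
          simp [hq, beq_iff_eq]
      · intro q w hqw
        by_cases hq : q = p
        · subst hq
          simp only [PySem.Dict.get?_insert_self] at hqw
          rw [hdp, ← hqw]
        · rw [PySem.Dict.get?_insert_of_ne idx v hq] at hqw
          exact h2 q w hqw
    | none =>
      rw [show pvExtract (idx, copy) p = (idx, copy) by simp [pvExtract, hg]]
      have h1p := h1 p
      rw [hg] at h1p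
      by_cases hic : idx.contains p = true
      · have hsome : (idx.get? p).isSome := by
          rw [← PySem.Dict.contains_eq_isSome_get?, hic]
        obtain ⟨w, hw⟩ := Option.isSome_iff_exists.mp hsome
        have hdp : d.get? p = some w := h2 p w hw
        have hdc : d.contains p = true := by rw [PySem.Dict.contains_eq_isSome_get?, hdp]; rfl
        have hdgd : d.getD p 0 = w := PySem.Dict.getD_of_get?_eq_some d 0 hdp
        rw [if_pos hdc, hdgd, pv_insert_eq_self idx p w hn hw]
        exact ih idx copy hn h1 h2
      · have hdp : d.get? p = none := by
          rw [if_neg hic] at h1p; exact h1p.symm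
        have hdc : d.contains p = false := by rw [PySem.Dict.contains_eq_isSome_get?, hdp]; rfl
        rw [if_neg (by simp [hdc])]
        exact ih idx copy hn h1 h2

theorem pv_extract_eq (item : List (String × Int)) (params : List String) :
    (params.foldl pvExtract ((PySem.Dict.empty : PySem.Dict String Int), PySem.Dict.mk item)).1
      = pvIdxOf (PySem.Dict.mk item) params := by
  apply pv_idx_eq (PySem.Dict.mk item) params PySem.Dict.empty (PySem.Dict.mk item)
  · exact PySem.Dict.nodup_keys_empty
  · intro p
    rw [PySem.Dict.contains_empty]
    simp
  · intro p v h
    rw [PySem.Dict.get?_empty] at h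
    exact absurd h (by simp)

-- pvIdxOf, characterised ------------------------------------------------------------------------

theorem pv_idx_mem_keys (d : PySem.Dict String Int) (ps : List String) (acc : PySem.Dict String Int)
    (k : String) :
    (k ∈ (ps.foldl (fun acc p => if d.contains p then acc.insert p (d.getD p 0) else acc) acc).keys)
      ↔ k ∈ acc.keys ∨ (k ∈ ps ∧ d.contains k = true) := by
  induction ps generalizing acc with
  | nil => simp
  | cons p ps ih =>
    rw [List.foldl_cons]
    by_cases hc : d.contains p = true
    · rw [if_pos hc, ih, PySem.Dict.mem_keys_insert]
      constructor
      · rintro (⟨h | h⟩ | h)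
        · exact Or.inr ⟨by simp [h], by rwa [h]⟩
        · exact Or.inl h
        · exact Or.inr ⟨by simp [h.1], h.2⟩
      · rintro (h | ⟨hm, hk⟩)
        · exact Or.inl (Or.inr h)
        · rcases List.mem_cons.mp hm with h | h
          · exact Or.inl (Or.inl h)
          · exact Or.inr ⟨h, hk⟩
    · rw [if_neg hc, ih]
      constructor
      · rintro (h | ⟨hm, hk⟩)
        · exact Or.inl h
        · exact Or.inr ⟨List.mem_cons_of_mem _ hm, hk⟩
      · rintro (h | ⟨hm, hk⟩)
        · exact Or.inl h
        · rcases List.mem_cons.mp hm with h | h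
          · subst h; exact absurd hk hc
          · exact Or.inr ⟨h, hk⟩

theorem pv_idx_nodup (d : PySem.Dict String Int) (ps : List String) (acc : PySem.Dict String Int)
    (hn : acc.keys.Nodup) :
    (ps.foldl (fun acc p => if d.contains p then acc.insert p (d.getD p 0) else acc) acc).keys.Nodup := by
  induction ps generalizing acc with
  | nil => simpa
  | cons p ps ih =>
    rw [List.foldl_cons]
    by_cases hc : d.contains p = true
    · rw [if_pos hc]; exact ih _ (PySem.Dict.nodup_keys_insert acc p _ hn)
    · rw [if_neg hc]; exact ih _ hn

theorem pv_idx_getD (d : PySem.Dict String Int) (ps : List String) (acc : PySem.Dict String Int)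
    (hacc : ∀ k ∈ acc.keys, acc.getD k 0 = d.getD k 0) (k : String)
    (hk : k ∈ (ps.foldl (fun acc p => if d.contains p then acc.insert p (d.getD p 0) else acc) acc).keys) :
    (ps.foldl (fun acc p => if d.contains p then acc.insert p (d.getD p 0) else acc) acc).getD k 0
      = d.getD k 0 := by
  induction ps generalizing acc with
  | nil => exact hacc k hk
  | cons p ps ih =>
    rw [List.foldl_cons] at hk ⊢
    by_cases hc : d.contains p = true
    · rw [if_pos hc] at hk ⊢
      refine ih _ ?_ hk
      intro q hq
      rw [PySem.Dict.getD_insert]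
      by_cases hqp : q = p
      · rw [if_pos hqp, hqp]
      · rw [if_neg hqp]
        exact hacc q (((PySem.Dict.mem_keys_insert _ _ _ _).mp hq).resolve_left hqp)
    · rw [if_neg hc] at hk ⊢
      exact ih _ hacc hk

-- per-item agreement of the two programs --------------------------------------------------------

theorem pv_set_contains (params : List String) (q : String) :
    (PySem.Set.ofList params).contains q = params.contains q := by
  rw [Bool.eq_iff_iff]
  simp [PySem.Set.mem_ofList]

theorem pv_key_eq (params : List String) (item : List (String × Int))
    (hn : (item.map Prod.fst).Nodup) :
    pvIndexTuple (pvIdxOf (PySem.Dict.mk item) params) = pvKeyOf (PySem.Set.ofList params) item := by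
  unfold pvIndexTuple pvKeyOf
  have hdkeys : (PySem.Dict.mk item).keys = item.map Prod.fst := rfl
  have hnL : ((PySem.Dict.mk item).keys.filter
      (fun k => (PySem.Set.ofList params).contains k)).Nodup := by
    rw [hdkeys]; exact hn.filter _
  have hnI : (pvIdxOf (PySem.Dict.mk item) params).keys.Nodup :=
    pv_idx_nodup _ _ _ PySem.Dict.nodup_keys_empty
  have hperm : (pvIdxOf (PySem.Dict.mk item) params).keys.Perm
      ((PySem.Dict.mk item).keys.filter (fun k => (PySem.Set.ofList params).contains k)) := by
    rw [List.perm_ext_iff_of_nodup hnI hnL]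
    intro a
    rw [List.mem_filter]
    unfold pvIdxOf
    rw [pv_idx_mem_keys]
    simp only [PySem.Dict.keys_empty, List.not_mem_nil, false_or]
    rw [pv_set_contains, List.contains_iff_mem,
        PySem.Dict.contains_eq_decide_mem_keys, decide_eq_true_iff, hdkeys]
    tauto
  rw [PySem.List.sorted_eq_sorted_of_perm _ _ _ (fun a b h => h) hperm]
  apply List.map_congr_left
  intro k hk
  have hk' : k ∈ (pvIdxOf (PySem.Dict.mk item) params).keys := by
    have := (PySem.List.mem_sorted ..).mp hk
    exact hperm.mem_iff.mpr this
  have := pv_idx_getD (PySem.Dict.mk item) params PySem.Dict.empty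
      (by intro q hq; simp at hq) k hk'
  rw [show pvIdxOf (PySem.Dict.mk item) params
        = params.foldl (fun acc p => if (PySem.Dict.mk item).contains p
            then acc.insert p ((PySem.Dict.mk item).getD p 0) else acc) PySem.Dict.empty from rfl] at *
  rw [this]

theorem pv_rest_eq (params : List String) (item : List (String × Int))
    (hn : (item.map Prod.fst).Nodup) :
    pvRest (PySem.Set.ofList params) item = item.filter (fun q => !(params.contains q.1)) := by
  unfold pvRest
  have hmk : (PySem.Dict.mk item).items = item := rfl
  rw [hmk]
  have hfc : item.filter (fun q => !((PySem.Set.ofList params).contains q.1))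
      = item.filter (fun q => !(params.contains q.1)) := by
    apply List.filter_congr; intro q _; rw [pv_set_contains]
  rw [PySem.List.foldl_if_eq_foldl_filter
        (fun (q : String × Int) => !((PySem.Set.ofList params).contains q.1))
        (fun acc (q : String × Int) => acc.insert q.1 q.2) item PySem.Dict.empty, hfc]
  rw [PySem.Dict.items_foldl_insert_fresh (item.filter (fun q => !(params.contains q.1)))
        Prod.fst Prod.snd PySem.Dict.empty
        (fun a _ => PySem.Dict.contains_empty a.1)
        ((List.filter_sublist.map Prod.fst).nodup hn)]
  rw [show (PySem.Dict.empty : PySem.Dict String Int).items = [] from rfl]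
  simp

-- the grouping shape: one fold with setdefault/update = first-appearance keys, each with its scan --

theorem pv_order_mem {α : Type} (K : α → List (String × Int)) (xs : List α)
    (acc : List (List (String × Int))) (k : List (String × Int)) :
    k ∈ xs.foldl (fun ord x => if ord.contains (K x) then ord else ord ++ [K x]) acc
      ↔ k ∈ acc ∨ k ∈ xs.map K := by
  induction xs generalizing acc with
  | nil => simp
  | cons x xs ih =>
    rw [List.foldl_cons]
    by_cases hc : acc.contains (K x) = true
    · rw [if_pos hc, ih, List.map_cons, List.mem_cons]
      have hx : K x ∈ acc := List.contains_iff_mem.mp hc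
      constructor
      · rintro (h | h)
        · exact Or.inl h
        · exact Or.inr (Or.inr h)
      · rintro (h | h | h)
        · exact Or.inl h
        · exact Or.inl (h ▸ hx)
        · exact Or.inr h
    · rw [if_neg hc, ih, List.map_cons, List.mem_cons, List.mem_append, List.mem_singleton]
      tauto

theorem pv_order_nodup {α : Type} (K : α → List (String × Int)) (xs : List α)
    (acc : List (List (String × Int))) (hn : acc.Nodup) :
    (xs.foldl (fun ord x => if ord.contains (K x) then ord else ord ++ [K x]) acc).Nodup := by
  induction xs generalizing acc with
  | nil => simpa
  | cons x xs ih =>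
    rw [List.foldl_cons]
    by_cases hc : acc.contains (K x) = true
    · rw [if_pos hc]; exact ih _ hn
    · rw [if_neg hc]
      refine ih _ (List.nodup_append.mpr ⟨hn, List.nodup_singleton _, ?_⟩)
      intro a ha b hb
      rw [List.mem_singleton] at hb
      subst hb
      intro heq
      exact absurd (List.contains_iff_mem.mpr (heq ▸ ha)) (by simpa using hc)

theorem pv_inner_none {α : Type} (K : α → List (String × Int)) (N : α → String)
    (V : α → List (String × Int)) (xs : List α) (k : List (String × Int))
    (h : ∀ x ∈ xs, K x ≠ k) :
    xs.foldl (fun inner x => if K x == k then inner.insert (N x) (V x) else inner)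
      (PySem.Dict.empty : PySem.Dict String (List (String × Int))) = PySem.Dict.empty := by
  induction xs with
  | nil => rfl
  | cons x xs ih =>
    rw [List.foldl_cons, if_neg (by simpa using h x (by simp))]
    exact ih (fun y hy => h y (by simp [hy]))

theorem pv_group {α : Type} (K : α → List (String × Int)) (N : α → String)
    (V : α → List (String × Int)) (xs : List α) :
    (xs.foldl (fun g x => g.modify (K x) PySem.Dict.empty (fun inner => inner.insert (N x) (V x)))
       (PySem.Dict.empty : PySem.Dict (List (String × Int)) (PySem.Dict String (List (String × Int))))).items
      = (xs.foldl (fun ord x => if ord.contains (K x) then ord else ord ++ [K x]) []).map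
          (fun k => (k, xs.foldl
            (fun inner x => if K x == k then inner.insert (N x) (V x) else inner) PySem.Dict.empty)) := by
  induction xs using List.reverseRecOn with
  | nil => rfl
  | append_singleton ys x ih =>
    simp only [List.foldl_append, List.foldl_cons, List.foldl_nil]
    set A := ys.foldl (fun g x => g.modify (K x) PySem.Dict.empty
        (fun inner => inner.insert (N x) (V x)))
        (PySem.Dict.empty : PySem.Dict (List (String × Int)) (PySem.Dict String (List (String × Int)))) with hA
    set ord := ys.foldl (fun ord x => if ord.contains (K x) then ord else ord ++ [K x])
        ([] : List (List (String × Int))) with hord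
    have hkeys : A.keys = ord := by
      show A.items.map Prod.fst = ord
      rw [ih, List.map_map]
      exact List.map_id ord
    have hAnodup : A.keys.Nodup := by rw [hkeys]; exact pv_order_nodup K ys [] List.nodup_nil
    have hcont : A.contains (K x) = ord.contains (K x) := by
      rw [PySem.Dict.contains_eq_decide_mem_keys, hkeys, Bool.eq_iff_iff,
          decide_eq_true_iff, List.contains_iff_mem]
    show (A.insert (K x) ((A.getD (K x) PySem.Dict.empty).insert (N x) (V x))).items = _
    by_cases hc : ord.contains (K x) = true
    · -- the key already has a group: the order list is unchanged, the group gains one entry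
      have hmemord : K x ∈ ord := List.contains_iff_mem.mp hc
      have hmemitems : (K x, ys.foldl (fun inner y =>
            if K y == K x then inner.insert (N y) (V y) else inner) PySem.Dict.empty) ∈ A.items := by
        rw [ih]; exact List.mem_map_of_mem hmemord
      have hgetD : A.getD (K x) PySem.Dict.empty
          = ys.foldl (fun inner y => if K y == K x then inner.insert (N y) (V y) else inner)
              PySem.Dict.empty :=
        PySem.Dict.getD_of_mem_items A hmemitems hAnodup _
      rw [PySem.Dict.items_insert_of_contains _ _ (by rw [hcont]; exact hc), ih,
          if_pos hc, List.map_map, hgetD]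
      apply List.map_congr_left
      intro k hk
      by_cases hkx : k = K x
      · subst hkx; simp
      · have h1 : (k == K x) = false := by simpa using hkx
        have h2 : (K x == k) = false := by simpa using Ne.symm hkx
        simp [Function.comp, h1, h2]
    · -- a brand-new key: it is appended to the order list with a fresh one-entry group
      have hnomem : K x ∉ ord := fun h => absurd (List.contains_iff_mem.mpr h) (by simpa using hc)
      have hgetD : A.getD (K x) PySem.Dict.empty = PySem.Dict.empty :=
        PySem.Dict.getD_of_not_contains A _ (by rw [hcont]; simpa using hc)
      rw [PySem.Dict.items_insert_of_not_contains _ _ (by rw [hcont]; simpa using hc), ih,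
          if_neg hc, List.map_append, hgetD]
      congr 1
      · apply List.map_congr_left
        intro k hk
        have hkx : K x ≠ k := fun h => hnomem (h ▸ hk)
        have h2 : (K x == k) = false := by simpa using hkx
        simp [h2]
      · have hempty : ys.foldl (fun inner y =>
            if K y == K x then inner.insert (N y) (V y) else inner) PySem.Dict.empty
            = PySem.Dict.empty := by
          apply pv_inner_none
          intro y hy hKy
          exact hnomem ((pv_order_mem K ys [] (K x)).mpr (Or.inr (hKy ▸ List.mem_map_of_mem hy)))
        simp only [List.map_cons, List.map_nil, beq_self_eq_true, if_true]
        rw [hempty]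

-- ===== VERDICT (by name: the statement is the Claim_ definition above) =====
theorem groupby_params_spec : Claim_equal_groupby_params := by
  intro dws params _ hpre
  unfold Spec_groupby_params groupby_params groupby_params_alt
  have hstep : dws.foldl (fun grouped kv =>
      let st := params.foldl pvExtract ((PySem.Dict.empty : PySem.Dict String Int), PySem.Dict.mk kv.2)
      grouped.modify (pvIndexTuple st.1) PySem.Dict.empty (fun inner => inner.insert kv.1 st.2.items))
      PySem.Dict.empty
    = dws.foldl (fun g kv =>
        g.modify (pvKeyOf (PySem.Set.ofList params) kv.2) PySem.Dict.empty
          (fun inner => inner.insert kv.1 (pvRest (PySem.Set.ofList params) kv.2))) PySem.Dict.empty := by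
    apply PySem.List.foldl_congr_mem
    intro acc kv hkv
    have hn := hpre kv hkv
    have h1 : (params.foldl pvExtract
        ((PySem.Dict.empty : PySem.Dict String Int), PySem.Dict.mk kv.2)).1
        = pvIdxOf (PySem.Dict.mk kv.2) params := pv_extract_eq kv.2 params
    have h2 : (params.foldl pvExtract
        ((PySem.Dict.empty : PySem.Dict String Int), PySem.Dict.mk kv.2)).2.items
        = kv.2.filter (fun q => !(params.contains q.1)) := pv_copy_items params _ _
    simp only [h1, h2, pv_key_eq params kv.2 hn, ← pv_rest_eq params kv.2 hn]
  rw [hstep, pv_group (fun kv => pvKeyOf (PySem.Set.ofList params) kv.2) Prod.fst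
        (fun kv => pvRest (PySem.Set.ofList params) kv.2) dws, List.map_map]
  rfl
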